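-- pv_equiv track=rewrite | github.com/vinifmor/guapow | guapow/service/optimizer/post_process/task.py | _map_governors
-- ===== SOURCE A (Python) =====
-- from typing import List, Optional, Dict, Set, Tuple, Type, Awaitable
--
-- def _map_governors(governors: List[Dict[str, Set[int]]]) -> Tuple[Dict[str, Set[int]], Dict[int, Set[str]]]:
--     governor_cpus, cpu_governors = {}, {}
--
--     if governors:
--         for govs in governors:
--             if govs:  # it is possible that previous governors could not be determined because they were set to 'performance' at that time
--                 for gov, cpus in govs.items():
--                     gov_cpus = governor_cpus.get(gov, set())
--                     gov_cpus.update(cpus)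
--                     governor_cpus[gov] = gov_cpus
--
--                     for cpu in cpus:
--                         govs = cpu_governors.get(cpu, set())
--                         govs.add(gov)
--                         cpu_governors[cpu] = govs
--
--     return governor_cpus, cpu_governors
-- ===== SOURCE B (Python) =====
-- from typing import List, Dict, Set, Tuple
--
--
-- def _map_governors(governors: List[Dict[str, Set[int]]]) -> Tuple[Dict[str, Set[int]], Dict[int, Set[str]]]:
--     # pass 1: governor -> cpus, unioning each governor's cpu set into a fresh accumulator
--     governor_cpus = {}
--     for govs in governors:
--         if govs:
--             for gov, cpus in govs.items():
--                 governor_cpus.setdefault(gov, set()).update(cpus)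
--
--     # pass 2: cpu -> governors, folded over the flattened (governor, cpu) pair stream
--     pairs = [(gov, cpu) for govs in governors if govs for gov, cpus in govs.items() for cpu in cpus]
--     cpu_governors = {}
--     for gov, cpu in pairs:
--         cpu_governors.setdefault(cpu, set()).add(gov)
--
--     return governor_cpus, cpu_governors
-- ===== Notes on version B (the rewrite author's own statement) =====
-- stated objective: alternative
-- what changed: Replaces A's single interleaved pass that threads both dicts through nested loops with two independent passes: one union-fold building governor_cpus, and one fold over a flattened (governor, cpu) pair stream building cpu_governors.
import Mathlib
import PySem

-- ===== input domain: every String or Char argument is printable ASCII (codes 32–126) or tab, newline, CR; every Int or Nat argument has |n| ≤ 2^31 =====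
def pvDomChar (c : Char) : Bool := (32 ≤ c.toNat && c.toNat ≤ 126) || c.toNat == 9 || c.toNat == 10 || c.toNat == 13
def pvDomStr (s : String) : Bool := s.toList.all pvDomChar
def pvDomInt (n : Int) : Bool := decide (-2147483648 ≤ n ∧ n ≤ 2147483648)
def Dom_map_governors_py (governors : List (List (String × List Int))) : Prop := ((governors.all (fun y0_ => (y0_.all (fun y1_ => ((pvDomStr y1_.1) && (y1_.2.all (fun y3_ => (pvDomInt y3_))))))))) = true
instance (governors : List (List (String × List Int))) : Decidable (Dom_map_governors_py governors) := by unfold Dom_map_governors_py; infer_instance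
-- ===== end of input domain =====

-- B replaces A's single interleaved pass (both dicts threaded through nested loops) with two
-- independent passes: a union-fold for governor_cpus and a fold over the flattened
-- (governor, cpu) pair stream for cpu_governors; same cost, different decomposition.
-- (A mutates the sets it stores in its dicts in place; the equivalence proved here is about the return value.)

-- ===== PORT A =====
def map_governors_py (governors : List (List (String × List Int))) : (List (String × List Int)) × (List (Int × List String)) :=
  let init : PySem.Dict String (List Int) × PySem.Dict Int (List String) :=
    (PySem.Dict.empty, PySem.Dict.empty)
  let st :=
    if governors.isEmpty then init else
      governors.foldl (fun st govs =>
        if govs.isEmpty then st else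
          govs.foldl (fun st p =>
            -- gov_cpus = governor_cpus.get(gov, set()); gov_cpus.update(cpus); governor_cpus[gov] = gov_cpus
            let gov_cpus := PySem.Set.update (st.1.getD p.1 PySem.Set.empty) p.2
            let gc := st.1.insert p.1 gov_cpus
            -- for cpu in cpus: govs = cpu_governors.get(cpu, set()); govs.add(gov); cpu_governors[cpu] = govs
            let cg := p.2.foldl (fun cg cpu =>
              cg.insert cpu (PySem.Set.add (cg.getD cpu PySem.Set.empty) p.1)) st.2
            (gc, cg)) st) init
  (st.1.items, st.2.items)

-- ===== PORT B =====
def map_governors_py_alt (governors : List (List (String × List Int))) : (List (String × List Int)) × (List (Int × List String)) :=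
  -- pass 1: governor_cpus.setdefault(gov, set()).update(cpus) — net effect: overwrite-in-place/append
  let gc := governors.foldl (fun gc govs =>
      if govs.isEmpty then gc else
        govs.foldl (fun gc p =>
          gc.insert p.1 (PySem.Set.update (gc.getD p.1 PySem.Set.empty) p.2)) gc)
    (PySem.Dict.empty : PySem.Dict String (List Int))
  -- pass 2: the flattened (gov, cpu) pair comprehension, then one fold over it
  let pairs := governors.flatMap (fun govs =>
      if govs.isEmpty then [] else
        govs.flatMap (fun p => p.2.map (fun cpu => (p.1, cpu))))
  -- cpu_governors.setdefault(cpu, set()).add(gov) — net effect: overwrite-in-place/append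
  let cg := pairs.foldl (fun cg q =>
      cg.insert q.2 (PySem.Set.add (cg.getD q.2 PySem.Set.empty) q.1))
    (PySem.Dict.empty : PySem.Dict Int (List String))
  (gc.items, cg.items)

-- ===== PRECONDITION & SPEC =====
def Spec_map_governors_py (governors : List (List (String × List Int))) (out : (List (String × List Int)) × (List (Int × List String))) : Prop := out = map_governors_py_alt governors
instance (governors : List (List (String × List Int))) (out : (List (String × List Int)) × (List (Int × List String))) : Decidable (Spec_map_governors_py governors out) := by unfold Spec_map_governors_py; infer_instance

-- ===== CLAIM (what is proved, stated in full; the proofs are below) =====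
def Claim_equal_map_governors_py : Prop := ∀ (governors : List (List (String × List Int))), Dom_map_governors_py governors → Spec_map_governors_py governors (map_governors_py governors)

-- ===== LEMMAS AND PROOFS =====

-- proof-only names for the two per-component step functions hidden inside A's interleaved fold
def pvGStep (gc : PySem.Dict String (List Int)) (p : String × List Int) : PySem.Dict String (List Int) :=
  gc.insert p.1 (PySem.Set.update (gc.getD p.1 PySem.Set.empty) p.2)

def pvCStep (gov : String) (cg : PySem.Dict Int (List String)) (cpu : Int) : PySem.Dict Int (List String) :=
  cg.insert cpu (PySem.Set.add (cg.getD cpu PySem.Set.empty) gov)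

def pvF1 (gc : PySem.Dict String (List Int)) (govs : List (String × List Int)) : PySem.Dict String (List Int) :=
  if govs.isEmpty then gc else govs.foldl pvGStep gc

def pvF2 (cg : PySem.Dict Int (List String)) (govs : List (String × List Int)) : PySem.Dict Int (List String) :=
  if govs.isEmpty then cg else govs.foldl (fun cg p => p.2.foldl (pvCStep p.1) cg) cg

-- a fold whose step acts componentwise on a pair state splits into two independent folds
theorem foldl_pair_split {α β γ : Type} (F : α × β → γ → α × β) (f : α → γ → α) (g : β → γ → β)
    (hF : ∀ st x, F st x = (f st.1 x, g st.2 x)) :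
    ∀ (l : List γ) (a : α) (b : β), l.foldl F (a, b) = (l.foldl f a, l.foldl g b) := by
  intro l
  induction l with
  | nil => intro a b; rfl
  | cons x xs ih =>
    intro a b
    simp only [List.foldl_cons, hF]
    exact ih _ _

-- folding over a flatMap is the nested fold
theorem foldl_flatMap {α γ δ : Type} (h : δ → List γ) (f : α → γ → α) :
    ∀ (l : List δ) (a : α), (l.flatMap h).foldl f a = l.foldl (fun a x => (h x).foldl f a) a := by
  intro l
  induction l with
  | nil => intro a; rfl
  | cons x xs ih => intro a; simp only [List.flatMap_cons, List.foldl_append, List.foldl_cons, ih]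

-- A's result, written with the two step functions made explicit
theorem mapA_eq (governors : List (List (String × List Int))) :
    map_governors_py governors =
      ((governors.foldl pvF1 PySem.Dict.empty).items, (governors.foldl pvF2 PySem.Dict.empty).items) := by
  have hsplit : ∀ (l : List (List (String × List Int))) (a : PySem.Dict String (List Int)) (b : PySem.Dict Int (List String)),
      l.foldl (fun st govs =>
        if govs.isEmpty then st else
          govs.foldl (fun st p =>
            let gov_cpus := PySem.Set.update (st.1.getD p.1 PySem.Set.empty) p.2
            let gc := st.1.insert p.1 gov_cpus
            let cg := p.2.foldl (fun cg cpu =>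
              cg.insert cpu (PySem.Set.add (cg.getD cpu PySem.Set.empty) p.1)) st.2
            (gc, cg)) st) (a, b)
      = (l.foldl pvF1 a, l.foldl pvF2 b) := by
    intro l a b
    apply foldl_pair_split
    intro st govs
    by_cases h : govs.isEmpty
    · simp [pvF1, pvF2, h]
    · simp only [pvF1, pvF2, h, Bool.false_eq_true, if_false]
      have := foldl_pair_split
        (fun (st : PySem.Dict String (List Int) × PySem.Dict Int (List String)) (p : String × List Int) =>
          (st.1.insert p.1 (PySem.Set.update (st.1.getD p.1 PySem.Set.empty) p.2),
           p.2.foldl (fun cg cpu => cg.insert cpu (PySem.Set.add (cg.getD cpu PySem.Set.empty) p.1)) st.2))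
        pvGStep (fun cg p => p.2.foldl (pvCStep p.1) cg)
        (by intro st p; rfl) govs st.1 st.2
      simpa using this
  cases governors with
  | nil => rfl
  | cons g gs =>
    unfold map_governors_py
    simp only [List.isEmpty_cons, Bool.false_eq_true, if_false]
    exact congrArg (fun q : PySem.Dict String (List Int) × PySem.Dict Int (List String) => (q.1.items, q.2.items)) (hsplit (g :: gs) _ _)

-- B's second pass, unnested back into A's loop shape
theorem mapB_eq (governors : List (List (String × List Int))) :
    map_governors_py_alt governors =
      ((governors.foldl pvF1 PySem.Dict.empty).items, (governors.foldl pvF2 PySem.Dict.empty).items) := by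
  unfold map_governors_py_alt
  refine congrArg₂ (fun x y => (PySem.Dict.items x, PySem.Dict.items y)) ?_ ?_
  · rfl
  · rw [foldl_flatMap]
    apply PySem.List.foldl_congr_mem
    intro cg govs _
    by_cases h : govs.isEmpty
    · simp [pvF2, h]
    · simp only [pvF2, h, Bool.false_eq_true, if_false, foldl_flatMap]
      apply PySem.List.foldl_congr_mem
      intro cg' p _
      rw [List.foldl_map]
      rfl

theorem map_governors_py_spec : Claim_equal_map_governors_py := by
  intro governors _
  show map_governors_py governors = map_governors_py_alt governors
  rw [mapA_eq, mapB_eq]
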